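-- pv_equiv track=rewrite | github.com/abhigandesri13/TCS-codevita-season-13 | TCS Round 2/8.py | propagate_breaks
-- ===== SOURCE A (Python) =====
-- from collections import deque, defaultdict
--
-- def build_graph(R,C,grid):
--     nodes = [(r,c) for r in range(R) for c in range(C) if grid[r][c] != '.']
--     idx = { (r,c):i for i,(r,c) in enumerate(nodes) }
--     n = len(nodes)
--     adj = [[] for _ in range(n)]
--     for i,(r,c) in enumerate(nodes):
--         # same-color orth adjacency -> bidirectional edges
--         for dr,dc in ((1,0),(-1,0),(0,1),(0,-1)):
--             nr, nc = r+dr, c+dc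
--             if 0 <= nr < R and 0 <= nc < C and grid[nr][nc] != '.' and grid[nr][nc] == grid[r][c]:
--                 j = idx[(nr,nc)]
--                 adj[i].append(j)
--         # vertical stacking: upper -> lower
--         if r-1 >= 0 and grid[r-1][c] != '.':
--             u = idx[(r-1,c)]
--             v = idx[(r,c)]
--             adj[u].append(v)
--     return nodes, idx, adj
--
-- def propagate_breaks(R,C,grid,color_vals, hit_r, hit_c):
--     # if hit cell empty, nothing
--     if not (0 <= hit_r < R and 0 <= hit_c < C) or grid[hit_r][hit_c] == '.':
--         return set(), 0
--     nodes, idx, adj = build_graph(R,C,grid)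
--     start = idx[(hit_r,hit_c)]
--     q = deque([start])
--     vis = set([start])
--     while q:
--         u = q.popleft()
--         for v in adj[u]:
--             if v not in vis:
--                 vis.add(v)
--                 q.append(v)
--     broken = set(nodes[i] for i in vis)
--     # compute hit score
--     counts = defaultdict(int)
--     for (r,c) in broken:
--         counts[grid[r][c]] += 1
--     score = 0
--     for col,cnt in counts.items():
--         score += cnt * color_vals.get(col,0)
--     return broken, score
-- ===== SOURCE B (Python) =====
-- from collections import deque
--
-- def propagate_breaks(R, C, grid, color_vals, hit_r, hit_c):
--     # BFS directly over grid coordinates; no node/index/adjacency tables.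
--     if not (0 <= hit_r < R and 0 <= hit_c < C) or grid[hit_r][hit_c] == '.':
--         return set(), 0
--
--     def succ(r, c):
--         out = []
--         for dr, dc in ((1, 0), (-1, 0), (0, 1), (0, -1)):
--             nr, nc = r + dr, c + dc
--             if 0 <= nr < R and 0 <= nc < C and grid[nr][nc] != '.' and grid[nr][nc] == grid[r][c]:
--                 out.append((nr, nc))
--         if r + 1 < R and grid[r + 1][c] != '.':
--             out.append((r + 1, c))  # directed stacking edge: upper -> lower
--         return out
--
--     q = deque([(hit_r, hit_c)])
--     broken = {(hit_r, hit_c)}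
--     while q:
--         r, c = q.popleft()
--         for nb in succ(r, c):
--             if nb not in broken:
--                 broken.add(nb)
--                 q.append(nb)
--
--     score = sum(color_vals.get(grid[r][c], 0) for (r, c) in broken)
--     return broken, score
-- ===== Notes on version B (the rewrite author's own statement) =====
-- stated objective: simpler
-- what changed: B drops build_graph entirely (no nodes list, no coordinate-to-index dict, no adjacency lists): it runs the BFS directly over grid coordinates, generating each cell's same-color neighbors and the directed downward stacking edge on the fly, and computes the score in one pass over the broken cells via color_vals.get instead of building a color counter dict first.
import Mathlib
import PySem

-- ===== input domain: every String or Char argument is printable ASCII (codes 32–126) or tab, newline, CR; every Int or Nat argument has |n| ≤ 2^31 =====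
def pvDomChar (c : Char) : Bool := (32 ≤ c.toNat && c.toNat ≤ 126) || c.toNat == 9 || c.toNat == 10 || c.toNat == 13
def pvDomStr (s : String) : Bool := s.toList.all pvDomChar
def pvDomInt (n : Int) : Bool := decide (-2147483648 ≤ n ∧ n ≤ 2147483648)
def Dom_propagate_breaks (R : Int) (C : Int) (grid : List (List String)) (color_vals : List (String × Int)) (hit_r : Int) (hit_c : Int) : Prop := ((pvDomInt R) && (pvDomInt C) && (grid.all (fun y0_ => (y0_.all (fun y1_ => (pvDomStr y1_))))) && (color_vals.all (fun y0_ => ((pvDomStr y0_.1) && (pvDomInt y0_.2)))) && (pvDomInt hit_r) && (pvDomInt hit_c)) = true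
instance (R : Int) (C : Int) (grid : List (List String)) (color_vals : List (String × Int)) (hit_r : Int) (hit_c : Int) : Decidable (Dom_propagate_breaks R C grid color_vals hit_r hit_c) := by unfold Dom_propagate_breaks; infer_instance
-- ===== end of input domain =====

-- B drops A's node/index/adjacency tables and runs the BFS directly over grid coordinates,
-- summing each broken cell's colour value directly instead of building a colour counter (objective: simpler).

-- ===== PORT A =====

-- grid[r][c] (total form; in-range under Pre_, exactly Python's access there)
def cellAt (grid : List (List String)) (r c : Int) : String :=
  PySem.List.pyGetD (PySem.List.pyGetD grid r []) c "."

def pbDirs : List (Int × Int) := [(1,0),(-1,0),(0,1),(0,-1)]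

-- nodes = [(r,c) for r in range(R) for c in range(C) if grid[r][c] != '.']
def buildNodes (R C : Int) (grid : List (List String)) : List (Int × Int) :=
  (PySem.List.pyRange 0 R 1).flatMap (fun r =>
    ((PySem.List.pyRange 0 C 1).filter (fun c => cellAt grid r c != ".")).map (fun c => (r, c)))

-- idx = { (r,c):i for i,(r,c) in enumerate(nodes) }
def buildIdx (nodes : List (Int × Int)) : PySem.Dict (Int × Int) Int :=
  PySem.Dict.ofList ((PySem.List.enumerate nodes).map (fun ip => (ip.2, ip.1)))

-- the adjacency-building loop of build_graph
def buildAdj (R C : Int) (grid : List (List String)) (nodes : List (Int × Int))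
    (idx : PySem.Dict (Int × Int) Int) : List (List Int) :=
  (PySem.List.enumerate nodes).foldl (fun adj ip =>
    let i := ip.1
    let r := ip.2.1
    let c := ip.2.2
    let adj := pbDirs.foldl (fun adj d =>
      let nr := r + d.1
      let nc := c + d.2
      if 0 ≤ nr ∧ nr < R ∧ 0 ≤ nc ∧ nc < C ∧ cellAt grid nr nc ≠ "." ∧ cellAt grid nr nc = cellAt grid r c then
        PySem.List.pySetD adj i (PySem.List.pyGetD adj i [] ++ [PySem.Dict.getD idx (nr, nc) 0])
      else adj) adj
    if 0 ≤ r - 1 ∧ cellAt grid (r - 1) c ≠ "." then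
      let u := PySem.Dict.getD idx (r - 1, c) 0
      let v := PySem.Dict.getD idx (r, c) 0
      PySem.List.pySetD adj u (PySem.List.pyGetD adj u [] ++ [v])
    else adj) (List.replicate nodes.length [])

-- the while-loop BFS of A over node indices; fuel only makes the loop total (one unit per pop)
def bfsA (adj : List (List Int)) : Nat → List Int → PySem.Set Int → PySem.Set Int
  | 0, _, vis => vis
  | _ + 1, [], vis => vis
  | fuel + 1, u :: q, vis =>
    let st := (PySem.List.pyGetD adj u []).foldl
      (fun (s : List Int × PySem.Set Int) v =>
        if PySem.Set.contains s.2 v then s else (s.1 ++ [v], PySem.Set.add s.2 v)) (q, vis)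
    bfsA adj fuel st.1 st.2

def propagate_breaks (R : Int) (C : Int) (grid : List (List String)) (color_vals : List (String × Int)) (hit_r : Int) (hit_c : Int) : (List (Int × Int)) × Int :=
  if ¬(0 ≤ hit_r ∧ hit_r < R ∧ 0 ≤ hit_c ∧ hit_c < C) ∨ cellAt grid hit_r hit_c = "." then
    ([], 0)
  else
    let nodes := buildNodes R C grid
    let idx := buildIdx nodes
    let adj := buildAdj R C grid nodes idx
    let start := PySem.Dict.getD idx (hit_r, hit_c) 0
    let vis := bfsA adj (R.toNat * C.toNat + 1) [start] (PySem.Set.ofList [start])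
    let broken := PySem.Set.ofList (vis.map (fun i => PySem.List.pyGetD nodes i (0, 0)))
    let counts := broken.foldl (fun d p => PySem.Dict.modify d (cellAt grid p.1 p.2) 0 (· + 1)) PySem.Dict.empty
    let score := counts.items.foldl (fun s kv => s + kv.2 * PySem.Dict.getD (PySem.Dict.mk color_vals) kv.1 0) 0
    (broken, score)

-- ===== PORT B =====

-- successors of (r,c): same-colour orthogonal neighbours, then the directed stacking edge downward
def succB (R C : Int) (grid : List (List String)) (r c : Int) : List (Int × Int) :=
  (pbDirs.foldl (fun out d =>
    if 0 ≤ r + d.1 ∧ r + d.1 < R ∧ 0 ≤ c + d.2 ∧ c + d.2 < C ∧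
        cellAt grid (r + d.1) (c + d.2) ≠ "." ∧
        cellAt grid (r + d.1) (c + d.2) = cellAt grid r c then
      out ++ [(r + d.1, c + d.2)]
    else out) []) ++
  (if r + 1 < R ∧ cellAt grid (r + 1) c ≠ "." then [(r + 1, c)] else [])

-- B's while-loop BFS over coordinates; same totality fuel
def bfsB (R C : Int) (grid : List (List String)) :
    Nat → List (Int × Int) → PySem.Set (Int × Int) → PySem.Set (Int × Int)
  | 0, _, vis => vis
  | _ + 1, [], vis => vis
  | fuel + 1, p :: q, vis =>
    let st := (succB R C grid p.1 p.2).foldl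
      (fun (s : List (Int × Int) × PySem.Set (Int × Int)) nb =>
        if PySem.Set.contains s.2 nb then s else (s.1 ++ [nb], PySem.Set.add s.2 nb)) (q, vis)
    bfsB R C grid fuel st.1 st.2

def propagate_breaks_alt (R : Int) (C : Int) (grid : List (List String)) (color_vals : List (String × Int)) (hit_r : Int) (hit_c : Int) : (List (Int × Int)) × Int :=
  if ¬(0 ≤ hit_r ∧ hit_r < R ∧ 0 ≤ hit_c ∧ hit_c < C) ∨ cellAt grid hit_r hit_c = "." then
    ([], 0)
  else
    let broken := bfsB R C grid (R.toNat * C.toNat + 1) [(hit_r, hit_c)] (PySem.Set.ofList [(hit_r, hit_c)])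
    let score := broken.foldl (fun s p => s + PySem.Dict.getD (PySem.Dict.mk color_vals) (cellAt grid p.1 p.2) 0) 0
    (broken, score)

-- ===== PRECONDITION & SPEC =====

-- Pre_ excludes exactly the inputs where Python A raises an IndexError: an in-bounds hit whose
-- grid access grid[hit_r][hit_c] is missing, or a non-empty hit cell with a grid that does not
-- cover the R×C ranges build_graph scans.
def Pre_propagate_breaks (R : Int) (C : Int) (grid : List (List String)) (color_vals : List (String × Int)) (hit_r : Int) (hit_c : Int) : Prop :=
  (0 ≤ hit_r ∧ hit_r < R ∧ 0 ≤ hit_c ∧ hit_c < C) →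
    (hit_r.toNat < grid.length ∧ hit_c.toNat < (grid.getD hit_r.toNat []).length ∧
      ((grid.getD hit_r.toNat []).getD hit_c.toNat "" ≠ "." →
        R.toNat ≤ grid.length ∧ ∀ row ∈ grid.take R.toNat, C.toNat ≤ row.length))
instance (R : Int) (C : Int) (grid : List (List String)) (color_vals : List (String × Int)) (hit_r : Int) (hit_c : Int) : Decidable (Pre_propagate_breaks R C grid color_vals hit_r hit_c) := by unfold Pre_propagate_breaks; infer_instance

def pvWitness_propagate_breaks : Int × Int × List (List String) × (List (String × Int)) × Int × Int :=
  (2, 2, [["a", "a"], [".", "b"]], [("a", 3), ("b", 5)], 0, 0)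

def Spec_propagate_breaks (R : Int) (C : Int) (grid : List (List String)) (color_vals : List (String × Int)) (hit_r : Int) (hit_c : Int) (out : (List (Int × Int)) × Int) : Prop := out = propagate_breaks_alt R C grid color_vals hit_r hit_c
instance (R : Int) (C : Int) (grid : List (List String)) (color_vals : List (String × Int)) (hit_r : Int) (hit_c : Int) (out : (List (Int × Int)) × Int) : Decidable (Spec_propagate_breaks R C grid color_vals hit_r hit_c out) := by unfold Spec_propagate_breaks; infer_instance

-- ===== CLAIM (what is proved, stated in full; the proofs are below) =====
def Claim_equal_propagate_breaks : Prop := ∀ (R : Int) (C : Int) (grid : List (List String)) (color_vals : List (String × Int)) (hit_r : Int) (hit_c : Int), Dom_propagate_breaks R C grid color_vals hit_r hit_c → Pre_propagate_breaks R C grid color_vals hit_r hit_c → Spec_propagate_breaks R C grid color_vals hit_r hit_c (propagate_breaks R C grid color_vals hit_r hit_c)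

-- ===== LEMMAS AND PROOFS =====

-- membership in the node list
theorem mem_buildNodes (R C : Int) (grid : List (List String)) (p : Int × Int) :
    p ∈ buildNodes R C grid ↔
      0 ≤ p.1 ∧ p.1 < R ∧ 0 ≤ p.2 ∧ p.2 < C ∧ cellAt grid p.1 p.2 ≠ "." := by
  obtain ⟨r, c⟩ := p
  simp only [buildNodes, List.mem_flatMap, List.mem_map, List.mem_filter,
    PySem.List.mem_pyRange_one, bne_iff_ne, ne_eq, Prod.mk.injEq]
  constructor
  · rintro ⟨r', ⟨hr1, hr2⟩, c', ⟨⟨hc1, hc2⟩, hne⟩, rfl, rfl⟩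
    exact ⟨hr1, hr2, hc1, hc2, hne⟩
  · rintro ⟨h1, h2, h3, h4, h5⟩
    exact ⟨r, ⟨h1, h2⟩, c, ⟨⟨h3, h4⟩, h5⟩, rfl, rfl⟩

-- the node list is enumerated in row-major (lexicographic) order
theorem pairwise_buildNodes (R C : Int) (grid : List (List String)) :
    (buildNodes R C grid).Pairwise
      (fun p q : Int × Int => p.1 < q.1 ∨ (p.1 = q.1 ∧ p.2 < q.2)) := by
  rw [buildNodes, List.pairwise_flatMap]
  constructor
  · intro r _
    rw [List.pairwise_map]
    exact ((PySem.List.pairwise_lt_pyRange_one 0 C).filter _).imp (fun h => Or.inr ⟨rfl, h⟩)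
  · refine (PySem.List.pairwise_lt_pyRange_one 0 R).imp ?_
    intro a b hab x hx y hy
    simp only [List.mem_map, List.mem_filter] at hx hy
    obtain ⟨c1, _, rfl⟩ := hx
    obtain ⟨c2, _, rfl⟩ := hy
    exact Or.inl hab

theorem nodup_buildNodes (R C : Int) (grid : List (List String)) :
    (buildNodes R C grid).Nodup := by
  refine (pairwise_buildNodes R C grid).imp ?_
  rintro ⟨a, b⟩ ⟨c, d⟩ h heq
  rw [Prod.mk.injEq] at heq
  rcases h with h | ⟨h1, h2⟩ <;> omega

theorem idxOf_inj (ns : List (Int × Int)) {x y : Int × Int}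
    (hx : x ∈ ns) (hy : y ∈ ns) (h : ns.idxOf x = ns.idxOf y) : x = y := by
  have h1 := List.getElem_idxOf (x := x) (List.idxOf_lt_length_of_mem hx)
  have h2 := List.getElem_idxOf (x := y) (List.idxOf_lt_length_of_mem hy)
  rw [← h1, ← h2]
  congr 1

-- dict lookup in the enumerate-built index
theorem getD_buildIdx (ns : List (Int × Int)) (hnd : ns.Nodup) (p : Int × Int)
    (hp : p ∈ ns) : PySem.Dict.getD (buildIdx ns) p 0 = (ns.idxOf p : Int) := by
  have hitems : (buildIdx ns).items =
      (PySem.List.enumerate ns).map (fun ip => (ip.2, ip.1)) := by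
    unfold buildIdx PySem.Dict.ofList PySem.Dict.update
    rw [List.foldl_map]
    have h := PySem.Dict.items_foldl_insert_fresh (PySem.List.enumerate ns)
      (fun ip => ip.2) (fun ip => ip.1) PySem.Dict.empty
      (fun a _ => PySem.Dict.contains_empty _)
      (by rw [show (fun ip : Int × (Int × Int) => ip.2) = (fun x : Int × (Int × Int) => x.2) from rfl,
          PySem.List.map_snd_enumerate]; exact hnd)
    simpa using h
  have hmem : (p, (ns.idxOf p : Int)) ∈ (buildIdx ns).items := by
    rw [hitems]
    refine List.mem_map.mpr ⟨((ns.idxOf p : Int), p), ?_, rfl⟩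
    rw [PySem.List.mem_enumerate_iff]
    exact ⟨ns.idxOf p, List.idxOf_lt_length_of_mem hp,
      by rw [List.getElem_idxOf (List.idxOf_lt_length_of_mem hp)]; simp⟩
  exact PySem.Dict.getD_of_mem_items _ hmem (PySem.Dict.nodup_keys_ofList _) 0

theorem nodeAt_idxOf (ns : List (Int × Int)) (p : Int × Int) (hp : p ∈ ns) :
    PySem.List.pyGetD ns (ns.idxOf p : Int) (0, 0) = p := by
  rw [PySem.List.pyGetD_natCast,
    List.getD_eq_getElem _ _ (List.idxOf_lt_length_of_mem hp),
    List.getElem_idxOf (List.idxOf_lt_length_of_mem hp)]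

-- one "adj[t].append(w)" event
def pbAppStep (adj : List (List Int)) (e : Int × Int) : List (List Int) :=
  PySem.List.pySetD adj e.1 (PySem.List.pyGetD adj e.1 [] ++ [e.2])

-- the append events one step of the adjacency loop performs, in order
def pbEvents (R C : Int) (grid : List (List String)) (idx : PySem.Dict (Int × Int) Int)
    (ip : Int × (Int × Int)) : List (Int × Int) :=
  (pbDirs.foldl (fun es d =>
    if 0 ≤ ip.2.1 + d.1 ∧ ip.2.1 + d.1 < R ∧ 0 ≤ ip.2.2 + d.2 ∧ ip.2.2 + d.2 < C ∧
        cellAt grid (ip.2.1 + d.1) (ip.2.2 + d.2) ≠ "." ∧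
        cellAt grid (ip.2.1 + d.1) (ip.2.2 + d.2) = cellAt grid ip.2.1 ip.2.2 then
      es ++ [(ip.1, PySem.Dict.getD idx (ip.2.1 + d.1, ip.2.2 + d.2) 0)]
    else es) []) ++
  (if 0 ≤ ip.2.1 - 1 ∧ cellAt grid (ip.2.1 - 1) ip.2.2 ≠ "." then
    [(PySem.Dict.getD idx (ip.2.1 - 1, ip.2.2) 0, PySem.Dict.getD idx ip.2 0)]
  else [])

theorem buildAdj_eq (R C : Int) (grid : List (List String)) (ns : List (Int × Int))
    (idx : PySem.Dict (Int × Int) Int) :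
    buildAdj R C grid ns idx =
      ((PySem.List.enumerate ns).flatMap (pbEvents R C grid idx)).foldl pbAppStep
        (List.replicate ns.length []) := by
  rw [List.foldl_flatMap]
  unfold buildAdj
  refine PySem.List.foldl_congr_mem _ _ _ _ ?_
  intro adj ip _
  simp only [pbEvents, pbDirs, List.foldl_cons, List.foldl_nil, List.foldl_append, pbAppStep]
  split_ifs <;> rfl

theorem get_appStep (adj : List (List Int)) (e : Int × Int) (u : Nat)
    (h0 : 0 ≤ e.1) (h1 : e.1.toNat < adj.length) :
    PySem.List.pyGetD (pbAppStep adj e) (u : Int) [] =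
      if e.1 = (u : Int) then PySem.List.pyGetD adj (u : Int) [] ++ [e.2]
      else PySem.List.pyGetD adj (u : Int) [] := by
  simp only [pbAppStep, PySem.List.pySetD_of_nonneg _ _ h0, PySem.List.pyGetD_natCast]
  rw [List.getD_eq_getElem?_getD, List.getElem?_set, List.getD_eq_getElem?_getD]
  by_cases h : e.1.toNat = u
  · have he : e.1 = (u : Int) := by omega
    rw [if_pos h, if_pos he, if_pos h1, Option.getD_some,
      PySem.List.pyGetD_of_nonneg _ _ h0, h, List.getD_eq_getElem?_getD]
  · have he : ¬ e.1 = (u : Int) := by omega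
    rw [if_neg h, if_neg he]

theorem get_foldl_appStep (es : List (Int × Int)) :
    ∀ (adj : List (List Int)) (u : Nat), u < adj.length →
      (∀ e ∈ es, 0 ≤ e.1 ∧ e.1.toNat < adj.length) →
      PySem.List.pyGetD (es.foldl pbAppStep adj) (u : Int) [] =
        PySem.List.pyGetD adj (u : Int) [] ++
          es.filterMap (fun e => if e.1 = (u : Int) then some e.2 else none) := by
  induction es with
  | nil => intro adj u _ _; simp
  | cons e es ih =>
    intro adj u hu he
    have h0 := (he e (List.mem_cons_self)).1
    have h1 := (he e (List.mem_cons_self)).2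
    have hlen : (pbAppStep adj e).length = adj.length := by
      simp [pbAppStep, PySem.List.length_pySetD]
    rw [List.foldl_cons,
      ih (pbAppStep adj e) u (by rw [hlen]; exact hu)
        (fun e' he' => by rw [hlen]; exact he e' (List.mem_cons_of_mem _ he')),
      get_appStep adj e u h0 h1, List.filterMap_cons]
    by_cases hEq : e.1 = (u : Int)
    · rw [if_pos hEq, if_pos hEq]
      simp [List.append_assoc]
    · rw [if_neg hEq, if_neg hEq]

-- a flatMap over an enumeration that selects a unique element
theorem flatMap_enumerate_if (x : Int × Int) (g : Int → List Int) :
    ∀ (l : List (Int × Int)) (s : Nat), l.Nodup →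
      (PySem.List.enumerate l (s : Int)).flatMap
          (fun ky => if ky.2 = x then g ky.1 else []) =
        if x ∈ l then g ((s + l.idxOf x : Nat) : Int) else [] := by
  intro l
  induction l with
  | nil => intro s _; simp [PySem.List.enumerate]
  | cons y l ih =>
    intro s hnd
    rw [PySem.List.enumerate_cons, List.flatMap_cons]
    by_cases hxy : y = x
    · have hyl : y ∉ l := (List.nodup_cons.mp hnd).1
      have hx : x ∉ l := fun h => hyl (hxy ▸ h)
      have htail : (PySem.List.enumerate l ((s : Int) + 1)).flatMap
          (fun ky => if ky.2 = x then g ky.1 else []) = [] := by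
        rw [List.flatMap_eq_nil_iff]
        intro ky hky
        rw [PySem.List.mem_enumerate_iff] at hky
        obtain ⟨k, hk, rfl⟩ := hky
        have : l[k] ≠ x := fun hh => hx (hh ▸ List.getElem_mem hk)
        simp [this]
      beta_reduce
      rw [if_pos (show y = x from hxy), htail, List.append_nil,
        if_pos (List.mem_cons.mpr (Or.inl hxy.symm)),
        show (y :: l).idxOf x = 0 from by rw [← hxy, List.idxOf_cons_self]]
      simp
    · have hxl : x ∈ y :: l ↔ x ∈ l := by
        constructor
        · intro h
          rcases List.mem_cons.mp h with h | h
          · exact absurd h.symm hxy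
          · exact h
        · intro h
          exact List.mem_cons_of_mem _ h
      have : ((s : Int) + 1) = ((s + 1 : Nat) : Int) := by push_cast; ring
      beta_reduce
      rw [if_neg (show ¬ y = x from hxy), List.nil_append, this,
        ih (s + 1) (List.nodup_cons.mp hnd).2]
      by_cases hmem : x ∈ l
      · rw [if_pos hmem, if_pos (hxl.mpr hmem)]
        have : (y :: l).idxOf x = l.idxOf x + 1 := List.idxOf_cons_ne _ hxy
        rw [this]
        congr 1
        omega
      · rw [if_neg hmem, if_neg (fun h => hmem (hxl.mp h))]

-- normalize an 'append if' loop to filter/map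
theorem dirfold_eq {β : Type} (P : Int × Int → Prop) [DecidablePred P] (f : Int × Int → β)
    (l : List (Int × Int)) :
    (l.foldl (fun es d => if P d then es ++ [f d] else es) []) =
      (l.filter (fun d => decide (P d))).map f := by
  rw [PySem.List.foldl_congr_mem _ _
    (fun es d => if decide (P d) = true then es ++ [f d] else es) _
    (fun es d _ => by simp), PySem.List.foldl_append_if]
  simp

-- the adjacency row of a node, as B computes successors
theorem adj_get (R C : Int) (grid : List (List String)) (p : Int × Int)
    (hp : p ∈ buildNodes R C grid) :
    PySem.List.pyGetD
        (buildAdj R C grid (buildNodes R C grid) (buildIdx (buildNodes R C grid)))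
        ((buildNodes R C grid).idxOf p : Int) [] =
      (succB R C grid p.1 p.2).map (fun q => ((buildNodes R C grid).idxOf q : Int)) := by
  set ns := buildNodes R C grid with hns
  set idx := buildIdx ns with hidx
  have hnd : ns.Nodup := nodup_buildNodes R C grid
  have hpw := pairwise_buildNodes R C grid
  set u := ns.idxOf p with hu
  have hu_lt : u < ns.length := List.idxOf_lt_length_of_mem hp
  have hpu : ns[u] = p := List.getElem_idxOf hu_lt
  obtain ⟨hp1, hp2, hp3, hp4, hp5⟩ := (mem_buildNodes R C grid p).mp hp
  -- every append event targets a valid node index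
  have hev : ∀ e ∈ (PySem.List.enumerate ns).flatMap (pbEvents R C grid idx),
      0 ≤ e.1 ∧ e.1.toNat < (List.replicate ns.length ([] : List Int)).length := by
    intro e he
    rw [List.length_replicate]
    rw [List.mem_flatMap] at he
    obtain ⟨ip, hip, hein⟩ := he
    rw [PySem.List.mem_enumerate_iff] at hip
    obtain ⟨k, hk, rfl⟩ := hip
    have hyn : ns[k] ∈ ns := List.getElem_mem hk
    obtain ⟨hy1, hy2, hy3, hy4, hy5⟩ := (mem_buildNodes R C grid ns[k]).mp hyn
    rw [pbEvents, List.mem_append] at hein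
    rcases hein with hd | hs
    · rw [dirfold_eq] at hd
      rw [List.mem_map] at hd
      obtain ⟨d, _, rfl⟩ := hd
      refine ⟨by simp, ?_⟩
      simp
      omega
    · by_cases hsc : 0 ≤ (ns[k]).1 - 1 ∧ cellAt grid ((ns[k]).1 - 1) (ns[k]).2 ≠ "."
      · rw [if_pos hsc] at hs
        have habove : ((ns[k]).1 - 1, (ns[k]).2) ∈ ns :=
          (mem_buildNodes R C grid _).mpr ⟨hsc.1, by omega, hy3, hy4, hsc.2⟩
        have hidxlt := List.idxOf_lt_length_of_mem habove
        rw [List.mem_singleton] at hs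
        subst hs
        rw [getD_buildIdx ns hnd _ habove]
        refine ⟨by simp, ?_⟩
        simpa using hidxlt
      · rw [if_neg hsc] at hs
        simp at hs
  rw [buildAdj_eq, get_foldl_appStep _ _ u (by simpa using hu_lt) hev]
  have hrep : PySem.List.pyGetD (List.replicate ns.length ([] : List Int)) (u : Int) [] = [] := by
    rw [PySem.List.pyGetD_natCast, List.getD_eq_getElem?_getD]
    simp [hu_lt]
  rw [hrep, List.nil_append, List.filterMap_flatMap]
  -- the same-colour successors of p, as node indices
  set SM := (pbDirs.filter (fun d => decide (0 ≤ p.1 + d.1 ∧ p.1 + d.1 < R ∧ 0 ≤ p.2 + d.2 ∧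
      p.2 + d.2 < C ∧ cellAt grid (p.1 + d.1) (p.2 + d.2) ≠ "." ∧
      cellAt grid (p.1 + d.1) (p.2 + d.2) = cellAt grid p.1 p.2))).map
      (fun d => ((ns.idxOf (p.1 + d.1, p.2 + d.2) : Nat) : Int)) with hSM
  -- per-step contribution to row u
  have hcontrib : ∀ ip ∈ PySem.List.enumerate ns,
      (pbEvents R C grid idx ip).filterMap
          (fun e => if e.1 = (u : Int) then some e.2 else none) =
        (if ip.1 = (u : Int) then SM else []) ++
          (if ip.2 = (p.1 + 1, p.2) then [ip.1] else []) := by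
    intro ip hip
    rw [PySem.List.mem_enumerate_iff] at hip
    obtain ⟨k, hk, rfl⟩ := hip
    have hyn : ns[k] ∈ ns := List.getElem_mem hk
    obtain ⟨hy1, hy2, hy3, hy4, hy5⟩ := (mem_buildNodes R C grid ns[k]).mp hyn
    rw [pbEvents, List.filterMap_append]
    congr 1
    · -- same-colour events: all target row k
      rw [dirfold_eq, List.filterMap_map]
      by_cases hk_u : (0 : Int) + (k : Int) = (u : Int)
      · have hku : k = u := by omega
        subst hku
        rw [if_pos hk_u]
        simp only [Function.comp_def, if_pos hk_u]
        rw [show (fun x : Int × Int =>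
            some (PySem.Dict.getD idx ((ns[u]).1 + x.1, (ns[u]).2 + x.2) 0)) =
          some ∘ (fun x : Int × Int =>
            PySem.Dict.getD idx ((ns[u]).1 + x.1, (ns[u]).2 + x.2) 0) from rfl,
          List.filterMap_eq_map, hpu, hSM]
        refine List.map_congr_left ?_
        intro d hd
        rw [List.mem_filter, decide_eq_true_eq] at hd
        obtain ⟨_, hc⟩ := hd
        have hmemd : (p.1 + d.1, p.2 + d.2) ∈ ns :=
          (mem_buildNodes R C grid _).mpr ⟨hc.1, hc.2.1, hc.2.2.1, hc.2.2.2.1, hc.2.2.2.2.1⟩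
        rw [getD_buildIdx ns hnd _ hmemd]
      · rw [if_neg hk_u]
        simp only [Function.comp_def, if_neg hk_u]
        simp
    · -- stacking event: present only at the node directly below p
      by_cases hsc : 0 ≤ (ns[k]).1 - 1 ∧ cellAt grid ((ns[k]).1 - 1) (ns[k]).2 ≠ "."
      · rw [if_pos hsc]
        have habove : ((ns[k]).1 - 1, (ns[k]).2) ∈ ns :=
          (mem_buildNodes R C grid _).mpr ⟨hsc.1, by omega, hy3, hy4, hsc.2⟩
        rw [List.filterMap_cons, List.filterMap_nil]
        rw [getD_buildIdx ns hnd _ habove, getD_buildIdx ns hnd _ hyn]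
        by_cases hbelow : ns[k] = (p.1 + 1, p.2)
        · have habp : ((ns[k]).1 - 1, (ns[k]).2) = p := by
            rw [hbelow]; simp
          rw [habp, if_pos rfl, if_pos hbelow]
          have hik : List.idxOf (ns[k]) ns < ns.length := List.idxOf_lt_length_of_mem hyn
          have h1 : ns[List.idxOf (ns[k]) ns]'hik = ns[k] := List.getElem_idxOf hik
          have : ns.idxOf ns[k] = k := (hnd.getElem_inj_iff).mp h1
          rw [this]
          simp
        · have hne : ¬ ((ns.idxOf ((ns[k]).1 - 1, (ns[k]).2) : Nat) : Int) = (u : Int) := by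
            intro hcon
            have : ns.idxOf ((ns[k]).1 - 1, (ns[k]).2) = ns.idxOf p := by
              rw [hu] at hcon; omega
            have heq := idxOf_inj ns habove hp this
            apply hbelow
            have h1 : (ns[k]).1 - 1 = p.1 := by rw [← heq]
            have h2 : (ns[k]).2 = p.2 := by rw [← heq]
            rw [Prod.ext_iff]
            exact ⟨by omega, h2⟩
          rw [if_neg hne, if_neg hbelow]
      · rw [if_neg hsc, if_neg ?_]
        · simp
        · intro hcon
          apply hsc
          have hcon' : ns[k] = (p.1 + 1, p.2) := hcon
          rw [hcon']
          refine ⟨by simp; omega, ?_⟩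
          have hx : p.1 + 1 - 1 = p.1 := by ring
          simpa [hx] using hp5
  rw [List.flatMap_congr hcontrib]
  -- split the enumeration at position u
  have hsplit : ns = ns.take u ++ p :: ns.drop (u + 1) := by
    conv_lhs => rw [← List.take_append_drop u ns]
    rw [List.drop_eq_getElem_cons hu_lt, hpu]
  have hlen_take : (ns.take u).length = u := by
    rw [List.length_take]; omega
  have henum : PySem.List.enumerate ns = PySem.List.enumerate (ns.take u) ++
      (((u : Int), p) :: PySem.List.enumerate (ns.drop (u + 1)) ((u : Int) + 1)) := by
    conv_lhs => rw [hsplit]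
    rw [PySem.List.enumerate_append, PySem.List.enumerate_cons, hlen_take]
    norm_num
  rw [henum, List.flatMap_append, List.flatMap_cons]
  -- the prefix contributes nothing
  have hpre : (PySem.List.enumerate (ns.take u)).flatMap
      (fun ky => (if ky.1 = (u : Int) then SM else []) ++
        (if ky.2 = (p.1 + 1, p.2) then [ky.1] else [])) = [] := by
    rw [List.flatMap_eq_nil_iff]
    intro ky hky
    rw [PySem.List.mem_enumerate_iff] at hky
    obtain ⟨j, hj, rfl⟩ := hky
    have hju : j < u := by
      rw [← hlen_take]
      exact hj
    have hj' : j < ns.length := by omega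
    have h1 : ¬ ((0 : Int) + (j : Int) = (u : Int)) := by omega
    have h2 : ¬ ((ns.take u)[j] = (p.1 + 1, p.2)) := by
      intro hcon
      have hje : ns[j]'hj' = (p.1 + 1, p.2) := by
        rw [← List.getElem_take (h := hj)]
        exact hcon
      have hrel := List.pairwise_iff_getElem.mp hpw j u hj' hu_lt hju
      rw [hje, hpu] at hrel
      rcases hrel with h | ⟨h, _⟩ <;> simp at h <;> omega
    rw [if_neg h1, if_neg h2]
    simp
  -- the node itself contributes its same-colour row
  have hmid : ((if ((u : Int)) = (u : Int) then SM else []) ++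
      (if p = (p.1 + 1, p.2) then [((u : Int))] else [])) = SM := by
    rw [if_pos rfl, if_neg ?_]
    · simp
    · intro hcon
      have := congrArg Prod.fst hcon
      simp at this
  -- the suffix contributes exactly the stacking edge into the node below p
  have hsuf : (PySem.List.enumerate (ns.drop (u + 1)) ((u : Int) + 1)).flatMap
      (fun ky => (if ky.1 = (u : Int) then SM else []) ++
        (if ky.2 = (p.1 + 1, p.2) then [ky.1] else [])) =
      if (p.1 + 1, p.2) ∈ ns.drop (u + 1) then
        [(((u + 1 + (ns.drop (u + 1)).idxOf (p.1 + 1, p.2) : Nat)) : Int)] else [] := by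
    have hcongr : ∀ ky ∈ PySem.List.enumerate (ns.drop (u + 1)) ((u : Int) + 1),
        ((if ky.1 = (u : Int) then SM else []) ++
          (if ky.2 = (p.1 + 1, p.2) then [ky.1] else [])) =
        (if ky.2 = (p.1 + 1, p.2) then [ky.1] else []) := by
      intro ky hky
      rw [PySem.List.mem_enumerate_iff] at hky
      obtain ⟨j, hj, rfl⟩ := hky
      rw [if_neg (by omega)]
      simp
    rw [List.flatMap_congr hcongr]
    have hcast : ((u : Int) + 1) = (((u + 1 : Nat)) : Int) := by push_cast; ring
    rw [hcast, flatMap_enumerate_if (p.1 + 1, p.2) (fun i => [i]) (ns.drop (u + 1)) (u + 1)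
      ((List.drop_sublist _ _).nodup hnd)]
  rw [hpre, hmid, hsuf, List.nil_append]
  -- compare with B's successor list
  have hmembelow : (p.1 + 1, p.2) ∈ ns.drop (u + 1) ↔
      (p.1 + 1 < R ∧ cellAt grid (p.1 + 1) p.2 ≠ ".") := by
    constructor
    · intro h
      have := (mem_buildNodes R C grid _).mp (hns ▸ List.mem_of_mem_drop h)
      exact ⟨this.2.1, this.2.2.2.2⟩
    · intro h
      have hbmem : (p.1 + 1, p.2) ∈ ns := by
        rw [hns, mem_buildNodes]
        exact ⟨by omega, h.1, hp3, hp4, h.2⟩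
      set i0 := ns.idxOf (p.1 + 1, p.2) with hi0
      have hi0lt : i0 < ns.length := List.idxOf_lt_length_of_mem hbmem
      have hi0e : ns[i0] = (p.1 + 1, p.2) := List.getElem_idxOf hi0lt
      have hne : i0 ≠ u := by
        intro hcon
        simp only [hcon] at hi0e
        rw [hpu] at hi0e
        have := congrArg Prod.fst hi0e
        simp at this
      have hgt : u < i0 := by
        rcases Nat.lt_or_ge i0 u with h' | h'
        · exfalso
          have hrel := List.pairwise_iff_getElem.mp hpw i0 u hi0lt hu_lt h'
          rw [hi0e, hpu] at hrel
          rcases hrel with hx | ⟨hx, _⟩ <;> simp at hx <;> omega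
        · omega
      have hlt' : i0 - (u + 1) < (ns.drop (u + 1)).length := by
        rw [List.length_drop]; omega
      have : (ns.drop (u + 1))[i0 - (u + 1)] = (p.1 + 1, p.2) := by
        rw [List.getElem_drop]
        simp only [show u + 1 + (i0 - (u + 1)) = i0 from by omega]
        exact hi0e
      rw [← this]
      exact List.getElem_mem hlt'
  have hidxbelow : (p.1 + 1, p.2) ∈ ns.drop (u + 1) →
      u + 1 + (ns.drop (u + 1)).idxOf (p.1 + 1, p.2) = ns.idxOf (p.1 + 1, p.2) := by
    intro h
    have hnd2 := hnd
    conv at hnd2 => rw [← List.take_append_drop (u + 1) ns]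
    have hnotin : (p.1 + 1, p.2) ∉ ns.take (u + 1) := by
      intro hcon
      exact ((List.nodup_append.mp hnd2).2.2 _ hcon _ h) rfl
    have : ns.idxOf (p.1 + 1, p.2) = (ns.take (u + 1) ++ ns.drop (u + 1)).idxOf (p.1 + 1, p.2) := by
      rw [List.take_append_drop]
    rw [this, List.idxOf_append, if_neg hnotin, List.length_take]
    omega
  rw [succB, List.map_append]
  congr 1
  · -- same-colour part
    rw [dirfold_eq (fun d : Int × Int => 0 ≤ p.1 + d.1 ∧ p.1 + d.1 < R ∧ 0 ≤ p.2 + d.2 ∧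
        p.2 + d.2 < C ∧ cellAt grid (p.1 + d.1) (p.2 + d.2) ≠ "." ∧
        cellAt grid (p.1 + d.1) (p.2 + d.2) = cellAt grid p.1 p.2)
      (fun d : Int × Int => (p.1 + d.1, p.2 + d.2)), List.map_map, hSM]
    rfl
  · -- stacking part
    by_cases hb : p.1 + 1 < R ∧ cellAt grid (p.1 + 1) p.2 ≠ "."
    · rw [if_pos (hmembelow.mpr hb), if_pos hb, hidxbelow (hmembelow.mpr hb)]
      simp
    · rw [if_neg (fun h => hb (hmembelow.mp h)), if_neg hb]
      simp

theorem succB_mem (R C : Int) (grid : List (List String)) (p : Int × Int)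
    (hp : p ∈ buildNodes R C grid) :
    ∀ q ∈ succB R C grid p.1 p.2, q ∈ buildNodes R C grid := by
  obtain ⟨hp1, hp2, hp3, hp4, hp5⟩ := (mem_buildNodes R C grid p).mp hp
  intro q hq
  rw [succB, List.mem_append] at hq
  rcases hq with hd | hs
  · rw [dirfold_eq (fun d : Int × Int => 0 ≤ p.1 + d.1 ∧ p.1 + d.1 < R ∧ 0 ≤ p.2 + d.2 ∧
      p.2 + d.2 < C ∧ cellAt grid (p.1 + d.1) (p.2 + d.2) ≠ "." ∧
      cellAt grid (p.1 + d.1) (p.2 + d.2) = cellAt grid p.1 p.2)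
      (fun d : Int × Int => (p.1 + d.1, p.2 + d.2))] at hd
    rw [List.mem_map] at hd
    obtain ⟨d, hdf, rfl⟩ := hd
    rw [List.mem_filter, decide_eq_true_eq] at hdf
    obtain ⟨_, hc⟩ := hdf
    rw [mem_buildNodes]
    exact ⟨hc.1, hc.2.1, hc.2.2.1, hc.2.2.2.1, hc.2.2.2.2.1⟩
  · by_cases hc : p.1 + 1 < R ∧ cellAt grid (p.1 + 1) p.2 ≠ "."
    · rw [if_pos hc, List.mem_singleton] at hs
      subst hs
      rw [mem_buildNodes]
      exact ⟨by omega, hc.1, hp3, hp4, hc.2⟩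
    · rw [if_neg hc] at hs
      simp at hs

-- the common coordinate-to-index map
def nsIdx (R C : Int) (grid : List (List String)) (q : Int × Int) : Int :=
  ((buildNodes R C grid).idxOf q : Int)

theorem contains_map_nsIdx (R C : Int) (grid : List (List String)) (vis : List (Int × Int))
    (v : Int × Int) (hv : v ∈ buildNodes R C grid)
    (hvis : ∀ x ∈ vis, x ∈ buildNodes R C grid) :
    PySem.Set.contains (vis.map (nsIdx R C grid)) (nsIdx R C grid v) =
      PySem.Set.contains vis v := by
  have hiff : nsIdx R C grid v ∈ vis.map (nsIdx R C grid) ↔ v ∈ vis := by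
    constructor
    · intro h
      obtain ⟨w, hw, heq⟩ := List.mem_map.mp h
      have hidx : (buildNodes R C grid).idxOf w = (buildNodes R C grid).idxOf v := by
        unfold nsIdx at heq
        exact_mod_cast heq
      exact (idxOf_inj (buildNodes R C grid) (hvis w hw) hv hidx) ▸ hw
    · intro h
      exact List.mem_map_of_mem h
  simp only [PySem.Set.contains]
  rw [List.contains_eq_mem, List.contains_eq_mem]
  exact decide_eq_decide.mpr hiff

theorem inner_closure (R C : Int) (grid : List (List String)) :
    ∀ (s : List (Int × Int)) (q vis : List (Int × Int)),
      (∀ x ∈ q, x ∈ buildNodes R C grid) → (∀ x ∈ vis, x ∈ buildNodes R C grid) →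
      (∀ x ∈ s, x ∈ buildNodes R C grid) →
      (∀ x ∈ (s.foldl (fun (st : List (Int × Int) × PySem.Set (Int × Int)) nb =>
          if PySem.Set.contains st.2 nb then st else (st.1 ++ [nb], PySem.Set.add st.2 nb))
          (q, vis)).1, x ∈ buildNodes R C grid) ∧
      (∀ x ∈ (s.foldl (fun (st : List (Int × Int) × PySem.Set (Int × Int)) nb =>
          if PySem.Set.contains st.2 nb then st else (st.1 ++ [nb], PySem.Set.add st.2 nb))
          (q, vis)).2, x ∈ buildNodes R C grid) := by
  intro s
  induction s with
  | nil => intro q vis hq hvis _; exact ⟨hq, hvis⟩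
  | cons v s ih =>
    intro q vis hq hvis hs
    have hv : v ∈ buildNodes R C grid := hs v List.mem_cons_self
    rw [List.foldl_cons]
    by_cases h : PySem.Set.contains vis v
    · rw [if_pos h]
      exact ih q vis hq hvis (fun x hx => hs x (List.mem_cons_of_mem _ hx))
    · rw [if_neg h]
      refine ih (q ++ [v]) (PySem.Set.add vis v) ?_ ?_
        (fun x hx => hs x (List.mem_cons_of_mem _ hx))
      · intro x hx
        rcases List.mem_append.mp hx with h' | h'
        · exact hq x h'
        · rw [List.mem_singleton] at h'
          rw [h']
          exact hv
      · intro x hx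
        rcases (PySem.Set.mem_add _ _ _).mp hx with h' | h'
        · exact hvis x h'
        · rw [h']
          exact hv

theorem inner_nodup (R C : Int) (grid : List (List String)) :
    ∀ (s : List (Int × Int)) (q vis : List (Int × Int)), vis.Nodup →
      ((s.foldl (fun (st : List (Int × Int) × PySem.Set (Int × Int)) nb =>
          if PySem.Set.contains st.2 nb then st else (st.1 ++ [nb], PySem.Set.add st.2 nb))
          (q, vis)).2).Nodup := by
  intro s
  induction s with
  | nil => intro q vis h; exact h
  | cons v s ih =>
    intro q vis h
    rw [List.foldl_cons]
    by_cases hc : PySem.Set.contains vis v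
    · rw [if_pos hc]; exact ih q vis h
    · rw [if_neg hc]; exact ih (q ++ [v]) _ (PySem.Set.nodup_add vis v h)

theorem inner_sim (R C : Int) (grid : List (List String)) :
    ∀ (s : List (Int × Int)) (q vis : List (Int × Int)),
      (∀ x ∈ vis, x ∈ buildNodes R C grid) → (∀ x ∈ s, x ∈ buildNodes R C grid) →
      ((s.map (nsIdx R C grid)).foldl
          (fun (st : List Int × PySem.Set Int) v =>
            if PySem.Set.contains st.2 v then st else (st.1 ++ [v], PySem.Set.add st.2 v))
          (q.map (nsIdx R C grid), vis.map (nsIdx R C grid))) =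
        (((s.foldl (fun (st : List (Int × Int) × PySem.Set (Int × Int)) nb =>
            if PySem.Set.contains st.2 nb then st else (st.1 ++ [nb], PySem.Set.add st.2 nb))
            (q, vis)).1).map (nsIdx R C grid),
         ((s.foldl (fun (st : List (Int × Int) × PySem.Set (Int × Int)) nb =>
            if PySem.Set.contains st.2 nb then st else (st.1 ++ [nb], PySem.Set.add st.2 nb))
            (q, vis)).2).map (nsIdx R C grid)) := by
  intro s
  induction s with
  | nil => intro q vis _ _; rfl
  | cons v s ih =>
    intro q vis hvis hs
    have hv : v ∈ buildNodes R C grid := hs v List.mem_cons_self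
    rw [List.map_cons, List.foldl_cons, List.foldl_cons,
      contains_map_nsIdx R C grid vis v hv hvis]
    by_cases h : PySem.Set.contains vis v
    · rw [if_pos h, if_pos h]
      exact ih q vis hvis (fun x hx => hs x (List.mem_cons_of_mem _ hx))
    · rw [if_neg h, if_neg h]
      have hvnot : v ∉ vis := by
        intro hcon
        rw [show PySem.Set.contains vis v = true from by
          simp only [PySem.Set.contains]; rw [List.contains_eq_mem]; simpa using hcon] at h
        exact h rfl
      have hInot : nsIdx R C grid v ∉ vis.map (nsIdx R C grid) := by
        intro hcon
        obtain ⟨w, hw, heq⟩ := List.mem_map.mp hcon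
        have hidx : (buildNodes R C grid).idxOf w = (buildNodes R C grid).idxOf v := by
          unfold nsIdx at heq; exact_mod_cast heq
        exact hvnot ((idxOf_inj (buildNodes R C grid) (hvis w hw) hv hidx) ▸ hw)
      rw [PySem.Set.add_of_not_mem hInot, PySem.Set.add_of_not_mem hvnot,
        show vis.map (nsIdx R C grid) ++ [nsIdx R C grid v] =
          (vis ++ [v]).map (nsIdx R C grid) from by simp,
        show q.map (nsIdx R C grid) ++ [nsIdx R C grid v] =
          (q ++ [v]).map (nsIdx R C grid) from by simp]
      refine ih (q ++ [v]) (vis ++ [v]) ?_ (fun x hx => hs x (List.mem_cons_of_mem _ hx))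
      intro x hx
      rcases List.mem_append.mp hx with h' | h'
      · exact hvis x h'
      · rw [List.mem_singleton] at h'; exact h' ▸ hv

theorem bfsB_closure (R C : Int) (grid : List (List String)) :
    ∀ (fuel : Nat) (q vis : List (Int × Int)),
      (∀ x ∈ q, x ∈ buildNodes R C grid) → (∀ x ∈ vis, x ∈ buildNodes R C grid) →
      ∀ x ∈ bfsB R C grid fuel q vis, x ∈ buildNodes R C grid := by
  intro fuel
  induction fuel with
  | zero => intro q vis _ hvis; exact hvis
  | succ fuel ih =>
    intro q vis hq hvis
    match q with
    | [] => exact hvis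
    | p :: q =>
      rw [bfsB]
      have hsucc : ∀ x ∈ succB R C grid p.1 p.2, x ∈ buildNodes R C grid :=
        succB_mem R C grid p (hq p List.mem_cons_self)
      have hcl := inner_closure R C grid (succB R C grid p.1 p.2) q vis
        (fun x hx => hq x (List.mem_cons_of_mem _ hx)) hvis hsucc
      exact ih _ _ hcl.1 hcl.2

theorem bfsB_nodup (R C : Int) (grid : List (List String)) :
    ∀ (fuel : Nat) (q vis : List (Int × Int)), vis.Nodup →
      (bfsB R C grid fuel q vis).Nodup := by
  intro fuel
  induction fuel with
  | zero => intro q vis h; exact h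
  | succ fuel ih =>
    intro q vis h
    match q with
    | [] => exact h
    | p :: q =>
      rw [bfsB]
      exact ih _ _ (inner_nodup R C grid (succB R C grid p.1 p.2) q vis h)

theorem bfs_sim (R C : Int) (grid : List (List String)) :
    ∀ (fuel : Nat) (q vis : List (Int × Int)),
      (∀ x ∈ q, x ∈ buildNodes R C grid) → (∀ x ∈ vis, x ∈ buildNodes R C grid) →
      bfsA (buildAdj R C grid (buildNodes R C grid) (buildIdx (buildNodes R C grid)))
          fuel (q.map (nsIdx R C grid)) (vis.map (nsIdx R C grid)) =
        (bfsB R C grid fuel q vis).map (nsIdx R C grid) := by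
  intro fuel
  induction fuel with
  | zero => intro q vis _ _; rfl
  | succ fuel ih =>
    intro q vis hq hvis
    match q with
    | [] => rfl
    | p :: q =>
      have hp : p ∈ buildNodes R C grid := hq p List.mem_cons_self
      rw [List.map_cons, bfsA, bfsB]
      have hadj := adj_get R C grid p hp
      rw [show nsIdx R C grid p = ((buildNodes R C grid).idxOf p : Int) from rfl, hadj]
      rw [show (fun q' : Int × Int => ((buildNodes R C grid).idxOf q' : Int)) =
        nsIdx R C grid from rfl]
      have hsucc : ∀ x ∈ succB R C grid p.1 p.2, x ∈ buildNodes R C grid :=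
        succB_mem R C grid p hp
      have hq' : ∀ x ∈ q, x ∈ buildNodes R C grid :=
        fun x hx => hq x (List.mem_cons_of_mem _ hx)
      rw [inner_sim R C grid (succB R C grid p.1 p.2) q vis hvis hsucc]
      have hcl := inner_closure R C grid (succB R C grid p.1 p.2) q vis hq' hvis hsucc
      exact ih _ _ hcl.1 hcl.2

theorem sum_map_ite_self (x : String) (v : Int) :
    ∀ (D : List String), D.Nodup → x ∈ D →
      (D.map (fun k => if k = x then v else 0)).sum = v := by
  intro D
  induction D with
  | nil => intro _ h; simp at h
  | cons y D ih =>
    intro hnd hx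
    rw [List.map_cons, List.sum_cons]
    by_cases hyx : y = x
    · subst hyx
      have hnot : y ∉ D := (List.nodup_cons.mp hnd).1
      have hzero : (D.map (fun k => if k = y then v else 0)).sum = 0 := by
        apply List.sum_eq_zero
        intro a ha
        obtain ⟨k, hk, rfl⟩ := List.mem_map.mp ha
        rw [if_neg (show ¬ k = y from fun h => hnot (h ▸ hk))]
      rw [if_pos rfl, hzero, add_zero]
    · have hx' : x ∈ D := by
        rcases List.mem_cons.mp hx with h | h
        · exact absurd h.symm hyx
        · exact h
      rw [if_neg hyx, ih (List.nodup_cons.mp hnd).2 hx', zero_add]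

theorem weighted_count_sum (V : String → Int) :
    ∀ (cs : List String) (D : List String), D.Nodup → (∀ x ∈ cs, x ∈ D) →
      (D.map (fun k => (cs.count k : Int) * V k)).sum = (cs.map V).sum := by
  intro cs
  induction cs with
  | nil => intro D _ _; simp
  | cons x cs ih =>
    intro D hnd hsub
    have hxD : x ∈ D := hsub x List.mem_cons_self
    have hpt : ∀ k ∈ D, ((x :: cs).count k : Int) * V k =
        (cs.count k : Int) * V k + (if k = x then V x else 0) := by
      intro k _
      rw [List.count_cons]
      by_cases hk : k = x
      · subst hk
        simp only [beq_self_eq_true, if_true]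
        push_cast
        ring
      · have hbx : (x == k) = false := beq_eq_false_iff_ne.mpr (fun h => hk h.symm)
        rw [hbx, if_neg hk]
        simp
    rw [List.map_congr_left hpt, PySem.List.sum_map_add_int,
      ih D hnd (fun y hy => hsub y (List.mem_cons_of_mem _ hy)),
      sum_map_ite_self x (V x) D hnd hxD, List.map_cons, List.sum_cons]
    ring

theorem score_fold_eq (l : List (Int × Int)) (key : Int × Int → String) (V : String → Int) :
    ((l.foldl (fun d p => PySem.Dict.modify d (key p) 0 (· + 1)) PySem.Dict.empty).items.foldl
        (fun s kv => s + kv.2 * V kv.1) 0) =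
      l.foldl (fun s p => s + V (key p)) 0 := by
  have hc : (l.foldl (fun d p => PySem.Dict.modify d (key p) 0 (· + 1)) PySem.Dict.empty) =
      PySem.Dict.counter (l.map key) := by
    rw [PySem.Dict.counter_eq_foldl, List.foldl_map]
  rw [hc, PySem.Dict.items_counter, List.foldl_map,
    PySem.List.foldl_add _ (fun k => ((l.map key).count k : Int) * V k) 0,
    PySem.List.foldl_add _ (fun p => V (key p)) 0,
    weighted_count_sum V (l.map key) (PySem.Set.ofList (l.map key))
      (PySem.Set.nodup_ofList _) (fun x hx => (PySem.Set.mem_ofList _ _).mpr hx),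
    List.map_map]
  rfl

theorem propagate_breaks_main' (R C : Int) (grid : List (List String))
    (color_vals : List (String × Int)) (hit_r hit_c : Int) :
    propagate_breaks R C grid color_vals hit_r hit_c =
      propagate_breaks_alt R C grid color_vals hit_r hit_c := by
  by_cases hcond : ¬(0 ≤ hit_r ∧ hit_r < R ∧ 0 ≤ hit_c ∧ hit_c < C) ∨
      cellAt grid hit_r hit_c = "."
  · rw [propagate_breaks, propagate_breaks_alt, if_pos hcond, if_pos hcond]
  · have hin : (0 ≤ hit_r ∧ hit_r < R ∧ 0 ≤ hit_c ∧ hit_c < C) ∧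
        cellAt grid hit_r hit_c ≠ "." := by
      push_neg at hcond
      exact hcond
    have hnd := nodup_buildNodes R C grid
    have hp : (hit_r, hit_c) ∈ buildNodes R C grid := by
      rw [mem_buildNodes]
      exact ⟨hin.1.1, hin.1.2.1, hin.1.2.2.1, hin.1.2.2.2, hin.2⟩
    have hstart : PySem.Dict.getD (buildIdx (buildNodes R C grid)) (hit_r, hit_c) 0 =
        nsIdx R C grid (hit_r, hit_c) :=
      getD_buildIdx (buildNodes R C grid) hnd _ hp
    have hsingle : ∀ x ∈ [(hit_r, hit_c)], x ∈ buildNodes R C grid := by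
      intro x hx
      rw [List.mem_singleton] at hx
      exact hx ▸ hp
    have hofl : PySem.Set.ofList [(hit_r, hit_c)] = [(hit_r, hit_c)] :=
      PySem.Set.ofList_eq_self_of_nodup _ (by simp)
    set visB := bfsB R C grid (R.toNat * C.toNat + 1) [(hit_r, hit_c)]
      (PySem.Set.ofList [(hit_r, hit_c)]) with hvisB
    have hclos : ∀ x ∈ visB, x ∈ buildNodes R C grid := by
      rw [hvisB, hofl]
      exact bfsB_closure R C grid _ _ _ hsingle hsingle
    have hvnodup : visB.Nodup := by
      rw [hvisB, hofl]
      exact bfsB_nodup R C grid _ _ _ (by simp)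
    have hsim : bfsA (buildAdj R C grid (buildNodes R C grid) (buildIdx (buildNodes R C grid)))
        (R.toNat * C.toNat + 1)
        [PySem.Dict.getD (buildIdx (buildNodes R C grid)) (hit_r, hit_c) 0]
        (PySem.Set.ofList [PySem.Dict.getD (buildIdx (buildNodes R C grid)) (hit_r, hit_c) 0]) =
        visB.map (nsIdx R C grid) := by
      rw [hstart]
      have h1 : [nsIdx R C grid (hit_r, hit_c)] = [(hit_r, hit_c)].map (nsIdx R C grid) := rfl
      have h2 : PySem.Set.ofList [nsIdx R C grid (hit_r, hit_c)] =
          [(hit_r, hit_c)].map (nsIdx R C grid) :=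
        PySem.Set.ofList_eq_self_of_nodup _ (by simp)
      rw [h2, h1, hvisB, hofl]
      exact bfs_sim R C grid _ _ _ hsingle hsingle
    have hbrokenA : PySem.Set.ofList ((visB.map (nsIdx R C grid)).map
        (fun i => PySem.List.pyGetD (buildNodes R C grid) i (0, 0))) = visB := by
      rw [List.map_map]
      have hid : visB.map ((fun i => PySem.List.pyGetD (buildNodes R C grid) i (0, 0)) ∘
          nsIdx R C grid) = visB := by
        rw [List.map_congr_left (g := id) ?_, List.map_id]
        intro x hx
        exact nodeAt_idxOf (buildNodes R C grid) x (hclos x hx)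
      rw [hid]
      exact PySem.Set.ofList_eq_self_of_nodup _ hvnodup
    rw [propagate_breaks, propagate_breaks_alt, if_neg hcond, if_neg hcond]
    show (PySem.Set.ofList ((bfsA _ _ _ _).map _),
        ((PySem.Set.ofList ((bfsA _ _ _ _).map _)).foldl _ PySem.Dict.empty).items.foldl _ 0) =
      (visB, visB.foldl _ 0)
    rw [hsim, hbrokenA]
    refine Prod.ext rfl ?_
    show ((visB.foldl (fun d p => PySem.Dict.modify d (cellAt grid p.1 p.2) 0 (· + 1))
        PySem.Dict.empty).items.foldl (fun s kv => s + kv.2 *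
          PySem.Dict.getD (PySem.Dict.mk color_vals) kv.1 0) 0) =
      visB.foldl (fun s p => s + PySem.Dict.getD (PySem.Dict.mk color_vals)
        (cellAt grid p.1 p.2) 0) 0
    exact score_fold_eq visB (fun p => cellAt grid p.1 p.2)
      (fun c0 => PySem.Dict.getD (PySem.Dict.mk color_vals) c0 0)

-- ===== VERDICT (by name: the statement is the Claim_ definition above) =====
theorem propagate_breaks_spec : Claim_equal_propagate_breaks := by
  intro R C grid color_vals hit_r hit_c _ _
  unfold Spec_propagate_breaks
  exact propagate_breaks_main' R C grid color_vals hit_r hit_c
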